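-- pv_equiv track=rewrite | github.com/theypsilon/Update_All_MiSTer | src/update_all/mister_video_mode_ui.py | save_video_mode_to_contents
-- ===== SOURCE A (Python) =====
-- from typing import Dict, Any, Optional, Callable, Iterable
--
-- def save_video_mode_to_contents(contents: str, mode_str: str) -> str:
--     new_lines = []
--     current_section = None
--     menu_section_found = False
--     video_mode_written = False
--     vga_scaler_written = False
--
--     for raw_line in contents.splitlines():
--         line = _ini_parse_line(raw_line)
--         section = _ini_get_section(line) if line else None
--         if section is not None:
--             if current_section == 'menu' and not video_mode_written:
--                 new_lines.append(f'video_mode={mode_str}')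
--                 video_mode_written = True
--             if current_section == 'menu' and not vga_scaler_written:
--                 new_lines.append('vga_scaler=1')
--                 vga_scaler_written = True
--
--             current_section = section
--             if current_section == 'menu':
--                 menu_section_found = True
--
--             new_lines.append(raw_line)
--             continue
--
--         if current_section == 'menu':
--             variable = _ini_get_var(line) if line else None
--             if variable is not None:
--                 if variable[0] == 'video_mode':
--                     if not video_mode_written:
--                         new_lines.append(f'video_mode={mode_str}')
--                         video_mode_written = True
--                     continue
--                 if variable[0] == 'vga_scaler':
--                     if not vga_scaler_written:
--                         new_lines.append('vga_scaler=1')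
--                         vga_scaler_written = True
--                     continue
--                 if variable[0] == 'direct_video':
--                     continue
--
--         new_lines.append(raw_line)
--
--     if current_section == 'menu' and not video_mode_written:
--         new_lines.append(f'video_mode={mode_str}')
--         video_mode_written = True
--     if current_section == 'menu' and not vga_scaler_written:
--         new_lines.append('vga_scaler=1')
--         vga_scaler_written = True
--
--     if not menu_section_found:
--         if new_lines:
--             new_lines.append('')
--         new_lines.append('[menu]')
--         new_lines.append(f'video_mode={mode_str}')
--         new_lines.append('vga_scaler=1')
--
--     return '\n'.join(new_lines).rstrip() + '\n'
--
-- def _ini_parse_line(raw: str) -> str: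
--     line = raw.lstrip(' \t')
--     comment_index = line.find(';')
--     if comment_index >= 0:
--         line = line[:comment_index]
--     return line.rstrip(' \t\r\n')
--
-- def _ini_get_section(line: str) -> Optional[str]:
--     if not line.startswith('['):
--         return None
--
--     end = line.find(']')
--     if end <= 1:
--         return None
--
--     return line[1:end].lower()
--
-- def _ini_get_var(line: str) -> Optional[tuple[str, str]]:
--     for index, character in enumerate(line):
--         if character in ('=', ' ', '\t'):
--             key = line[:index].lower()
--             value = line[index + 1:].lstrip('= \t')
--             return key, value
--     return None
-- ===== SOURCE B (Python) =====
-- from typing import Optional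
--
--
-- def _ini_parse_line(raw: str) -> str:
--     line = raw.lstrip(' \t')
--     comment_index = line.find(';')
--     if comment_index >= 0:
--         line = line[:comment_index]
--     return line.rstrip(' \t\r\n')
--
--
-- def _ini_get_section(line: str) -> Optional[str]:
--     if not line.startswith('['):
--         return None
--     end = line.find(']')
--     if end <= 1:
--         return None
--     return line[1:end].lower()
--
--
-- def _ini_get_var(line: str) -> Optional[tuple[str, str]]:
--     for index, character in enumerate(line):
--         if character in ('=', ' ', '\t'):
--             key = line[:index].lower()
--             value = line[index + 1:].lstrip('= \t')
--             return key, value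
--     return None
--
--
-- def _classify(raw: str) -> Optional[str]:
--     """Section name if raw is a section header, else None."""
--     line = _ini_parse_line(raw)
--     return _ini_get_section(line) if line else None
--
--
-- def save_video_mode_to_contents(contents: str, mode_str: str) -> str:
--     lines = contents.splitlines()
--     out = []
--     i = 0
--     # preamble: everything before the first section header passes through
--     while i < len(lines) and _classify(lines[i]) is None:
--         out.append(lines[i])
--         i += 1
--     vm_written = False
--     vga_written = False
--     menu_found = False
--     # block pass: each header together with its body lines
--     while i < len(lines):
--         header = lines[i]
--         i += 1
--         start = i
--         while i < len(lines) and _classify(lines[i]) is None: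
--             i += 1
--         body = lines[start:i]
--         out.append(header)
--         if _classify(header) == 'menu':
--             menu_found = True
--             for raw in body:
--                 line = _ini_parse_line(raw)
--                 var = _ini_get_var(line) if line else None
--                 key = var[0] if var is not None else None
--                 if key == 'video_mode':
--                     if not vm_written:
--                         out.append(f'video_mode={mode_str}')
--                         vm_written = True
--                 elif key == 'vga_scaler':
--                     if not vga_written:
--                         out.append('vga_scaler=1')
--                         vga_written = True
--                 elif key == 'direct_video':
--                     pass
--                 else:
--                     out.append(raw)
--             if not vm_written:
--                 out.append(f'video_mode={mode_str}')
--             if not vga_written: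
--                 out.append('vga_scaler=1')
--             vm_written = True
--             vga_written = True
--         else:
--             out.extend(body)
--     if not menu_found:
--         if lines:
--             out.append('')
--         out.append('[menu]')
--         out.append(f'video_mode={mode_str}')
--         out.append('vga_scaler=1')
--     return '\n'.join(out).rstrip() + '\n'
-- ===== Notes on version B (the rewrite author's own statement) =====
-- stated objective: alternative
-- what changed: B replaces A's single flag-driven line scan (tracking current_section across every line) with a two-phase block decomposition: it first copies the preamble, then consumes the file block by block (each [section] header with its span of body lines), editing only menu blocks and flushing the missing video_mode/vga_scaler entries at each menu block's end, with written-flags shared across blocks.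
import Mathlib
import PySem

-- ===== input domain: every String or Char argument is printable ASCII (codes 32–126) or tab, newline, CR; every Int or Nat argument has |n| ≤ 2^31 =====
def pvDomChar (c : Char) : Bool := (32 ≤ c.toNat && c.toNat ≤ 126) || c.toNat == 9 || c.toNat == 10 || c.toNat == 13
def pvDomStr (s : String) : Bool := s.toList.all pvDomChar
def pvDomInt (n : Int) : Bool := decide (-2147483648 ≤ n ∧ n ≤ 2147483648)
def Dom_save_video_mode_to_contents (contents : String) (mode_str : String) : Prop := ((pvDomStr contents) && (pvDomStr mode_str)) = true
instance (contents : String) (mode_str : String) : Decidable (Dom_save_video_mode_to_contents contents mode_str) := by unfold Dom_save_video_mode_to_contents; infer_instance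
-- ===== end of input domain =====

-- B rebuilds the INI in two phases (group lines into preamble + [section] blocks, then emit
-- block by block) instead of A's single flag-driven scan; objective: alternative decomposition.

-- shared helpers of both Python files, ported by hand (PySem has no lstrip/rstrip with a chars argument):
-- Python s.lstrip(chars): drop leading characters that are in chars — exact.
def pvLstripChars (chars : List Char) (cs : List Char) : List Char := cs.dropWhile (chars.contains ·)
-- Python s.rstrip(chars): drop trailing characters that are in chars — exact.
def pvRstripChars (chars : List Char) (cs : List Char) : List Char :=
  (cs.reverse.dropWhile (chars.contains ·)).reverse

-- _ini_parse_line
def iniParseLine (raw : List Char) : List Char :=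
  let line := pvLstripChars [' ', '\t'] raw
  let ci := PySem.Chars.find line [';']
  let line := if ci ≥ 0 then PySem.Chars.slice line none (some ci) else line
  pvRstripChars [' ', '\t', '\r', '\n'] line

-- _ini_get_section
def iniGetSection (line : List Char) : Option (List Char) :=
  if ¬ (PySem.Chars.startswith line ['['] = true) then none
  else
    let e := PySem.Chars.find line [']']
    if e ≤ 1 then none
    else some (PySem.Chars.lower (PySem.Chars.slice line (some 1) (some e)))

-- _ini_get_var: the enumerate loop; pre is line[:index] built left to right
def iniGetVarGo (pre : List Char) : List Char → Option (List Char × List Char)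
  | [] => none
  | c :: rest =>
    if c = '=' ∨ c = ' ' ∨ c = '\t' then
      some (PySem.Chars.lower pre, pvLstripChars ['=', ' ', '\t'] rest)
    else iniGetVarGo (pre ++ [c]) rest

def iniGetVar (line : List Char) : Option (List Char × List Char) := iniGetVarGo [] line

def mnu : List Char := "menu".toList
def videoLine (mode : List Char) : List Char := "video_mode=".toList ++ mode
def vgaLine : List Char := "vga_scaler=1".toList

-- ===== PORT A =====
-- the body of A's for-loop; state = (new_lines, current_section, menu_section_found, video_mode_written, vga_scaler_written)
def aStep (mode : List Char)
    (st : List (List Char) × Option (List Char) × Bool × Bool × Bool) (raw : List Char) :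
    List (List Char) × Option (List Char) × Bool × Bool × Bool :=
  let acc := st.1
  let cur := st.2.1
  let mf := st.2.2.1
  let vm := st.2.2.2.1
  let vs := st.2.2.2.2
  let line := iniParseLine raw
  let sec := if line ≠ [] then iniGetSection line else none
  match sec with
  | some s =>
    let acc1 := if cur = some mnu ∧ vm = false then acc ++ [videoLine mode] else acc
    let vm1 := if cur = some mnu ∧ vm = false then true else vm
    let acc2 := if cur = some mnu ∧ vs = false then acc1 ++ [vgaLine] else acc1
    let vs1 := if cur = some mnu ∧ vs = false then true else vs
    let mf1 := if s = mnu then true else mf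
    (acc2 ++ [raw], some s, mf1, vm1, vs1)
  | none =>
    if cur = some mnu then
      let var := if line ≠ [] then iniGetVar line else none
      match var with
      | some v =>
        if v.1 = "video_mode".toList then
          if vm = false then (acc ++ [videoLine mode], cur, mf, true, vs) else (acc, cur, mf, vm, vs)
        else if v.1 = "vga_scaler".toList then
          if vs = false then (acc ++ [vgaLine], cur, mf, vm, true) else (acc, cur, mf, vm, vs)
        else if v.1 = "direct_video".toList then (acc, cur, mf, vm, vs)
        else (acc ++ [raw], cur, mf, vm, vs)
      | none => (acc ++ [raw], cur, mf, vm, vs)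
    else (acc ++ [raw], cur, mf, vm, vs)

def save_video_mode_to_contents (contents : String) (mode_str : String) : String :=
  let mode := mode_str.toList
  let r := (PySem.Chars.splitlines contents.toList).foldl (aStep mode) ([], none, false, false, false)
  let acc1 := if r.2.1 = some mnu ∧ r.2.2.2.1 = false then r.1 ++ [videoLine mode] else r.1
  let acc2 := if r.2.1 = some mnu ∧ r.2.2.2.2 = false then acc1 ++ [vgaLine] else acc1
  let acc3 := if r.2.2.1 = false then
      (if acc2 ≠ [] then acc2 ++ [([] : List Char)] else acc2) ++ ["[menu]".toList, videoLine mode, vgaLine]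
    else acc2
  String.ofList (PySem.Chars.rstrip (PySem.Chars.join ['\n'] acc3) ++ ['\n'])

-- ===== PORT B =====
-- _classify
def classify (raw : List Char) : Option (List Char) :=
  let line := iniParseLine raw
  if line ≠ [] then iniGetSection line else none

-- the "copy/collect body lines while not a header" inner loops of B: (body, rest)
def spanBody : List (List Char) → List (List Char) × List (List Char)
  | [] => ([], [])
  | raw :: rest =>
    if classify raw = none then
      let p := spanBody rest
      (raw :: p.1, p.2)
    else ([], raw :: rest)

-- needed for termination of procBlocks
theorem spanBody_snd_length_le (l : List (List Char)) : (spanBody l).2.length ≤ l.length := by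
  induction l with
  | nil => simp [spanBody]
  | cons raw rest ih =>
    simp only [spanBody]
    split
    · simpa using Nat.le_succ_of_le ih
    · simp

-- B's "for raw in body" edit loop inside a menu block
def procMenuBody (mode : List Char) (vm vs : Bool) : List (List Char) → List (List Char) × Bool × Bool
  | [] => ([], vm, vs)
  | raw :: rest =>
    let line := iniParseLine raw
    let var := if line ≠ [] then iniGetVar line else none
    let key := var.map Prod.fst
    if key = some "video_mode".toList then
      if vm = false then
        let r := procMenuBody mode true vs rest
        (videoLine mode :: r.1, r.2)
      else procMenuBody mode vm vs rest
    else if key = some "vga_scaler".toList then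
      if vs = false then
        let r := procMenuBody mode vm true rest
        (vgaLine :: r.1, r.2)
      else procMenuBody mode vm vs rest
    else if key = some "direct_video".toList then procMenuBody mode vm vs rest
    else
      let r := procMenuBody mode vm vs rest
      (raw :: r.1, r.2)

-- the two trailing "if not written: append" statements of a menu block
def flushMissing (mode : List Char) (vm vs : Bool) : List (List Char) :=
  (if vm = false then [videoLine mode] else []) ++ (if vs = false then [vgaLine] else [])

-- B's outer while loop: one iteration per block (header + its body)
def procBlocks (mode : List Char) (vm vs mf : Bool) :
    List (List Char) → List (List Char) × Bool × Bool × Bool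
  | [] => ([], vm, vs, mf)
  | hdr :: rest =>
    if classify hdr = some mnu then
      let m := procMenuBody mode vm vs (spanBody rest).1
      let r := procBlocks mode true true true (spanBody rest).2
      (hdr :: (m.1 ++ flushMissing mode m.2.1 m.2.2 ++ r.1), r.2)
    else
      let r := procBlocks mode vm vs mf (spanBody rest).2
      (hdr :: ((spanBody rest).1 ++ r.1), r.2)
  termination_by l => l.length
  decreasing_by all_goals (have := spanBody_snd_length_le rest; simp; omega)

def save_video_mode_to_contents_alt (contents : String) (mode_str : String) : String :=
  let mode := mode_str.toList
  let lines := PySem.Chars.splitlines contents.toList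
  let p := spanBody lines
  let r := procBlocks mode false false false p.2
  let out := p.1 ++ r.1
  let out1 := if r.2.2.2 = false then
      (if lines ≠ [] then out ++ [([] : List Char)] else out) ++ ["[menu]".toList, videoLine mode, vgaLine]
    else out
  String.ofList (PySem.Chars.rstrip (PySem.Chars.join ['\n'] out1) ++ ['\n'])

-- ===== PRECONDITION & SPEC =====
def Spec_save_video_mode_to_contents (contents : String) (mode_str : String) (out : String) : Prop := out = save_video_mode_to_contents_alt contents mode_str
instance (contents : String) (mode_str : String) (out : String) : Decidable (Spec_save_video_mode_to_contents contents mode_str out) := by unfold Spec_save_video_mode_to_contents; infer_instance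

-- ===== CLAIM (what is proved, stated in full; the proofs are below) =====
def Claim_equal_save_video_mode_to_contents : Prop := ∀ (contents : String) (mode_str : String), Dom_save_video_mode_to_contents contents mode_str → Spec_save_video_mode_to_contents contents mode_str (save_video_mode_to_contents contents mode_str)


-- ===== LEMMAS AND PROOFS =====

-- A's two end-of-input "if still missing, append" statements, as a function of the loop state
def aFinish (mode : List Char) (r : List (List Char) × Option (List Char) × Bool × Bool × Bool) :
    List (List Char) :=
  let acc1 := if r.2.1 = some mnu ∧ r.2.2.2.1 = false then r.1 ++ [videoLine mode] else r.1
  if r.2.1 = some mnu ∧ r.2.2.2.2 = false then acc1 ++ [vgaLine] else acc1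

-- B's continuation from the middle of the file: the current section is cur, flags vm/vs/mf
def BCont (mode : List Char) (cur : Option (List Char)) (vm vs mf : Bool)
    (ls : List (List Char)) : List (List Char) × Bool × Bool × Bool :=
  if cur = some mnu then
    let m := procMenuBody mode vm vs (spanBody ls).1
    let r := procBlocks mode true true mf (spanBody ls).2
    (m.1 ++ flushMissing mode m.2.1 m.2.2 ++ r.1, r.2)
  else
    let r := procBlocks mode vm vs mf (spanBody ls).2
    ((spanBody ls).1 ++ r.1, r.2)

theorem procBlocks_header (mode : List Char) {hdr : List Char} {s : List Char}
    (rest : List (List Char)) (h : classify hdr = some s) (vm vs mf : Bool) :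
    procBlocks mode vm vs mf (hdr :: rest) =
      (hdr :: (BCont mode (some s) vm vs (if s = mnu then true else mf) rest).1,
       (BCont mode (some s) vm vs (if s = mnu then true else mf) rest).2) := by
  rw [procBlocks]
  by_cases hs : s = mnu <;> simp [BCont, h, hs]

theorem aFold_eq_BCont (mode : List Char) (ls : List (List Char)) :
    ∀ (acc : List (List Char)) (cur : Option (List Char)) (mf vm vs : Bool),
      aFinish mode (ls.foldl (aStep mode) (acc, cur, mf, vm, vs)) =
        acc ++ (BCont mode cur vm vs mf ls).1 ∧
      (ls.foldl (aStep mode) (acc, cur, mf, vm, vs)).2.2.1 =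
        (BCont mode cur vm vs mf ls).2.2.2 := by
  induction ls with
  | nil =>
    intro acc cur mf vm vs
    by_cases hc : cur = some mnu
    · constructor
      · simp only [List.foldl_nil, aFinish, BCont, spanBody, procBlocks, procMenuBody,
          flushMissing, hc]
        split_ifs <;> simp_all
      · simp [BCont, spanBody, procBlocks, hc]
    · constructor
      · simp [aFinish, BCont, spanBody, procBlocks, hc]
      · simp [BCont, spanBody, procBlocks, hc]
  | cons raw ls ih =>
    intro acc cur mf vm vs
    rw [List.foldl_cons]
    rcases hcl : classify raw with _ | s
    · -- body line
      have hcl' : (if iniParseLine raw ≠ [] then iniGetSection (iniParseLine raw) else none)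
          = (none : Option (List Char)) := by simpa [classify] using hcl
      by_cases hc : cur = some mnu
      · -- inside the menu section
        rcases hvar : (if iniParseLine raw ≠ [] then iniGetVar (iniParseLine raw) else none)
          with _ | ⟨k, v⟩
        · have hstep : aStep mode (acc, cur, mf, vm, vs) raw = (acc ++ [raw], cur, mf, vm, vs) := by
            simp [aStep, hcl', hc, hvar]
          have hB : BCont mode cur vm vs mf (raw :: ls)
              = (raw :: (BCont mode cur vm vs mf ls).1, (BCont mode cur vm vs mf ls).2) := by
            simp [BCont, spanBody, procMenuBody, hcl, hc, hvar]
          obtain ⟨ih1, ih2⟩ := ih (acc ++ [raw]) cur mf vm vs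
          rw [hstep, hB, ih1, ih2]
          simp
        · by_cases hk1 : k = ['v','i','d','e','o','_','m','o','d','e']
          · by_cases hvm : vm = false
            · have hstep : aStep mode (acc, cur, mf, vm, vs) raw
                  = (acc ++ [videoLine mode], cur, mf, true, vs) := by
                simp [aStep, hcl', hc, hvar, hk1, hvm]
              have hB : BCont mode cur vm vs mf (raw :: ls)
                  = (videoLine mode :: (BCont mode cur true vs mf ls).1,
                     (BCont mode cur true vs mf ls).2) := by
                simp [BCont, spanBody, procMenuBody, hcl, hc, hvar, hk1, hvm]
              obtain ⟨ih1, ih2⟩ := ih (acc ++ [videoLine mode]) cur mf true vs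
              rw [hstep, hB, ih1, ih2]
              simp
            · have hstep : aStep mode (acc, cur, mf, vm, vs) raw = (acc, cur, mf, vm, vs) := by
                simp [aStep, hcl', hc, hvar, hk1, hvm]
              have hB : BCont mode cur vm vs mf (raw :: ls) = BCont mode cur vm vs mf ls := by
                simp [BCont, spanBody, procMenuBody, hcl, hc, hvar, hk1, hvm]
              obtain ⟨ih1, ih2⟩ := ih acc cur mf vm vs
              rw [hstep, hB, ih1, ih2]
              simp
          · by_cases hk2 : k = ['v','g','a','_','s','c','a','l','e','r']
            · by_cases hvs : vs = false
              · have hstep : aStep mode (acc, cur, mf, vm, vs) raw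
                    = (acc ++ [vgaLine], cur, mf, vm, true) := by
                  simp [aStep, hcl', hc, hvar, hk2, hvs]
                have hB : BCont mode cur vm vs mf (raw :: ls)
                    = (vgaLine :: (BCont mode cur vm true mf ls).1,
                       (BCont mode cur vm true mf ls).2) := by
                  simp [BCont, spanBody, procMenuBody, hcl, hc, hvar, hk2, hvs]
                obtain ⟨ih1, ih2⟩ := ih (acc ++ [vgaLine]) cur mf vm true
                rw [hstep, hB, ih1, ih2]
                simp
              · have hstep : aStep mode (acc, cur, mf, vm, vs) raw = (acc, cur, mf, vm, vs) := by
                  simp [aStep, hcl', hc, hvar, hk2, hvs]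
                have hB : BCont mode cur vm vs mf (raw :: ls) = BCont mode cur vm vs mf ls := by
                  simp [BCont, spanBody, procMenuBody, hcl, hc, hvar, hk2, hvs]
                obtain ⟨ih1, ih2⟩ := ih acc cur mf vm vs
                rw [hstep, hB, ih1, ih2]
                simp
            · by_cases hk3 : k = ['d','i','r','e','c','t','_','v','i','d','e','o']
              · have hstep : aStep mode (acc, cur, mf, vm, vs) raw = (acc, cur, mf, vm, vs) := by
                  simp [aStep, hcl', hc, hvar, hk3]
                have hB : BCont mode cur vm vs mf (raw :: ls) = BCont mode cur vm vs mf ls := by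
                  simp [BCont, spanBody, procMenuBody, hcl, hc, hvar, hk3]
                obtain ⟨ih1, ih2⟩ := ih acc cur mf vm vs
                rw [hstep, hB, ih1, ih2]
                simp
              · have hstep : aStep mode (acc, cur, mf, vm, vs) raw
                    = (acc ++ [raw], cur, mf, vm, vs) := by
                  simp [aStep, hcl', hc, hvar, hk1, hk2, hk3]
                have hB : BCont mode cur vm vs mf (raw :: ls)
                    = (raw :: (BCont mode cur vm vs mf ls).1, (BCont mode cur vm vs mf ls).2) := by
                  simp [BCont, spanBody, procMenuBody, hcl, hc, hvar, hk1, hk2, hk3]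
                obtain ⟨ih1, ih2⟩ := ih (acc ++ [raw]) cur mf vm vs
                rw [hstep, hB, ih1, ih2]
                simp
      · -- body line outside the menu section
        have hstep : aStep mode (acc, cur, mf, vm, vs) raw = (acc ++ [raw], cur, mf, vm, vs) := by
          simp [aStep, hcl', hc]
        have hB : BCont mode cur vm vs mf (raw :: ls)
            = (raw :: (BCont mode cur vm vs mf ls).1, (BCont mode cur vm vs mf ls).2) := by
          simp [BCont, spanBody, hcl, hc]
        obtain ⟨ih1, ih2⟩ := ih (acc ++ [raw]) cur mf vm vs
        rw [hstep, hB, ih1, ih2]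
        simp
    · -- section header
      have hcl' : (if iniParseLine raw ≠ [] then iniGetSection (iniParseLine raw) else none)
          = some s := by simpa [classify] using hcl
      by_cases hc : cur = some mnu
      · have hstep : aStep mode (acc, cur, mf, vm, vs) raw
            = (acc ++ flushMissing mode vm vs ++ [raw], some s,
               if s = mnu then true else mf, true, true) := by
          simp only [aStep, hcl', hc]
          simp [flushMissing]
          split_ifs <;> simp_all
        have hB : BCont mode cur vm vs mf (raw :: ls)
            = (flushMissing mode vm vs ++ raw ::
                 (BCont mode (some s) true true (if s = mnu then true else mf) ls).1,
               (BCont mode (some s) true true (if s = mnu then true else mf) ls).2) := by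
          have hspan : spanBody (raw :: ls) = ([], raw :: ls) := by simp [spanBody, hcl]
          simp [BCont, hspan, hc, procMenuBody, procBlocks_header mode ls hcl]
        obtain ⟨ih1, ih2⟩ := ih (acc ++ flushMissing mode vm vs ++ [raw]) (some s)
          (if s = mnu then true else mf) true true
        rw [hstep, hB, ih1, ih2]
        simp
      · have hstep : aStep mode (acc, cur, mf, vm, vs) raw
            = (acc ++ [raw], some s, if s = mnu then true else mf, vm, vs) := by
          simp [aStep, hcl', hc]
        have hB : BCont mode cur vm vs mf (raw :: ls)
            = (raw :: (BCont mode (some s) vm vs (if s = mnu then true else mf) ls).1,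
               (BCont mode (some s) vm vs (if s = mnu then true else mf) ls).2) := by
          have hspan : spanBody (raw :: ls) = ([], raw :: ls) := by simp [spanBody, hcl]
          simp [BCont, hspan, hc, procBlocks_header mode ls hcl]
        obtain ⟨ih1, ih2⟩ := ih (acc ++ [raw]) (some s) (if s = mnu then true else mf) vm vs
        rw [hstep, hB, ih1, ih2]
        simp

theorem aStep_mf_mono (mode raw : List Char)
    (st : List (List Char) × Option (List Char) × Bool × Bool × Bool)
    (h : st.2.2.1 = true) : (aStep mode st raw).2.2.1 = true := by
  obtain ⟨acc, cur, mf, vm, vs⟩ := st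
  simp only at h
  rcases hcl : (if iniParseLine raw ≠ [] then iniGetSection (iniParseLine raw) else none)
    with _ | s
  · rcases hvar : (if iniParseLine raw ≠ [] then iniGetVar (iniParseLine raw) else none)
      with _ | ⟨k, v⟩
    case none => simp [aStep, hcl, hvar, h]
    case some => simp [aStep, hcl, hvar, h]; split_ifs <;> simp
  · simp [aStep, hcl, h]

theorem aFold_mf_mono (mode : List Char) (ls : List (List Char)) :
    ∀ st, st.2.2.1 = true → (ls.foldl (aStep mode) st).2.2.1 = true := by
  induction ls with
  | nil => intro st h; simpa using h
  | cons raw ls ih =>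
    intro st h
    rw [List.foldl_cons]
    exact ih _ (aStep_mf_mono mode raw st h)

theorem aFold_no_menu (mode : List Char) (ls : List (List Char)) :
    ∀ (acc : List (List Char)) (cur : Option (List Char)) (mf vm vs : Bool),
      cur ≠ some mnu →
      (ls.foldl (aStep mode) (acc, cur, mf, vm, vs)).2.2.1 = false →
      (ls.foldl (aStep mode) (acc, cur, mf, vm, vs)).1 = acc ++ ls ∧
      (ls.foldl (aStep mode) (acc, cur, mf, vm, vs)).2.1 ≠ some mnu := by
  induction ls with
  | nil => intro acc cur mf vm vs h _; exact ⟨by simp, h⟩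
  | cons raw ls ih =>
    intro acc cur mf vm vs hcur hmf
    rw [List.foldl_cons] at hmf ⊢
    rcases hcl : (if iniParseLine raw ≠ [] then iniGetSection (iniParseLine raw) else none)
      with _ | s
    · have hstep : aStep mode (acc, cur, mf, vm, vs) raw = (acc ++ [raw], cur, mf, vm, vs) := by
        simp [aStep, hcl, hcur]
      rw [hstep] at hmf ⊢
      have := ih (acc ++ [raw]) cur mf vm vs hcur hmf
      simpa using this
    · have hstep : aStep mode (acc, cur, mf, vm, vs) raw
          = (acc ++ [raw], some s, if s = mnu then true else mf, vm, vs) := by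
        simp [aStep, hcl, hcur]
      rw [hstep] at hmf ⊢
      have hs : ¬ s = mnu := by
        intro hs
        rw [if_pos hs] at hmf
        have := aFold_mf_mono mode ls (acc ++ [raw], some s, true, vm, vs) (by simp)
        rw [hmf] at this
        exact Bool.false_ne_true this
      have := ih (acc ++ [raw]) (some s) (if s = mnu then true else mf) vm vs
        (by simp [hs]) hmf
      simpa using this


-- ===== VERDICT (by name: the statement is the Claim_ definition above) =====
theorem save_video_mode_to_contents_spec : Claim_equal_save_video_mode_to_contents := by
  intro contents mode_str _
  unfold Spec_save_video_mode_to_contents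
  have hA : save_video_mode_to_contents contents mode_str =
      (let mode := mode_str.toList
       let r := (PySem.Chars.splitlines contents.toList).foldl (aStep mode)
         ([], none, false, false, false)
       let acc2 := aFinish mode r
       String.ofList (PySem.Chars.rstrip (PySem.Chars.join ['\n']
         (if r.2.2.1 = false then
           (if acc2 ≠ [] then acc2 ++ [([] : List Char)] else acc2) ++
             ["[menu]".toList, videoLine mode, vgaLine]
          else acc2)) ++ ['\n'])) := rfl
  have hB : save_video_mode_to_contents_alt contents mode_str =
      (let mode := mode_str.toList
       let lines := PySem.Chars.splitlines contents.toList
       let b := BCont mode none false false false lines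
       String.ofList (PySem.Chars.rstrip (PySem.Chars.join ['\n']
         (if b.2.2.2 = false then
           (if lines ≠ [] then b.1 ++ [([] : List Char)] else b.1) ++
             ["[menu]".toList, videoLine mode, vgaLine]
          else b.1)) ++ ['\n'])) := by
    simp only [save_video_mode_to_contents_alt, BCont]
    simp
  rw [hA, hB]
  simp only []
  obtain ⟨h1, h2⟩ := aFold_eq_BCont mode_str.toList (PySem.Chars.splitlines contents.toList)
    [] none false false false
  rw [List.nil_append] at h1
  rw [← h2, h1]
  by_cases hmf : (List.foldl (aStep mode_str.toList) ([], none, false, false, false)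
      (PySem.Chars.splitlines contents.toList)).2.2.1 = false
  · obtain ⟨hacc, hcur⟩ := aFold_no_menu mode_str.toList (PySem.Chars.splitlines contents.toList)
      [] none false false false (by simp) hmf
    have hfin : aFinish mode_str.toList (List.foldl (aStep mode_str.toList)
        ([], none, false, false, false) (PySem.Chars.splitlines contents.toList)) =
        PySem.Chars.splitlines contents.toList := by
      simp [aFinish, hcur]
      exact hacc.trans (by simp)
    rw [← h1, hfin]
  · simp [hmf]
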